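-- pv_equiv track=rewrite | github.com/HolyJack/StaticCodeAnalyzer | code_analyzer.py | style_error_004
-- ===== SOURCE A (Python) =====
-- def find_comment_pos(line):
--     quote, ignore, skip = None, False, False
--
--     for i, c in enumerate(line):
--         if skip:
--             skip = False
--             continue
--
--         if c == '\\':
--             skip = True
--             continue
--
--         if not ignore and (c == '"' or c == "'"):
--             quote, ignore = c, True
--         elif not ignore and c == '#':
--             return i
--         elif ignore and c == quote:
--             quote, ignore = None, False
--
--     return -1
--
-- def style_error_004(line):
--     pos = find_comment_pos(line)
--
--     if pos != -1:
--         line = line[:pos]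
--         line = line[::-1]
--
--         for i, c in enumerate(line):
--             if c != ' ' and i < 2:
--                 return True
--             elif c != ' ':
--                 return False
--
--     return False
-- ===== SOURCE B (Python) =====
-- def style_error_004(line):
--     quote = None
--     skip = False
--     space_run = 0
--     seen_nonspace = False
--     for c in line:
--         if skip:
--             skip = False
--         elif c == '\\':
--             skip = True
--         elif quote is None and (c == '"' or c == "'"):
--             quote = c
--         elif quote is None and c == '#':
--             return seen_nonspace and space_run < 2
--         elif quote is not None and c == quote:
--             quote = None
--         if c == ' ':
--             space_run += 1
--         else:
--             space_run = 0
--             seen_nonspace = True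
--     return False
-- ===== Notes on version B (the rewrite author's own statement) =====
-- stated objective: simpler
-- what changed: A finds the comment-start position, slices the prefix, reverses it and rescans for the first non-space; B is a single forward pass that maintains the current run of spaces and a seen-nonspace flag and decides immediately when the comment character is reached.
import Mathlib
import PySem

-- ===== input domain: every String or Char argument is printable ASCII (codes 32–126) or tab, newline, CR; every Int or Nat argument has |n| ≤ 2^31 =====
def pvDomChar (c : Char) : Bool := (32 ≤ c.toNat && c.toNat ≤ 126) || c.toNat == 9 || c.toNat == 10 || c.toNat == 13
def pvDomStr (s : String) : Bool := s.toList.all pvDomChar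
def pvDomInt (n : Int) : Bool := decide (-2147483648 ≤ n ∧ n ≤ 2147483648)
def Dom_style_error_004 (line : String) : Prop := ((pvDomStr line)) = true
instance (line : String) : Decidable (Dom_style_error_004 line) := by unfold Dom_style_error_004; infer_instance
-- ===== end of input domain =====

-- B replaces A's "find '#', slice, reverse, rescan" with a single pass that tracks the
-- current run of spaces and whether a non-space has been seen (objective: simpler, one pass).

-- ===== PORT A =====
-- find_comment_pos: loop with i, quote, ignore, skip
def pvFcp : List Char → Int → Option Char → Bool → Bool → Int
  | [], _, _, _, _ => -1
  | c :: rest, i, quote, ignore, skip =>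
    if skip then pvFcp rest (i + 1) quote ignore false
    else if c = '\\' then pvFcp rest (i + 1) quote ignore true
    else if !ignore && (c = '"' || c = '\'') then pvFcp rest (i + 1) (some c) true skip
    else if !ignore && c = '#' then i
    else if ignore && quote = some c then pvFcp rest (i + 1) none false skip
    else pvFcp rest (i + 1) quote ignore skip

-- the 'for i, c in enumerate(line)' tail loop of style_error_004
def pvCheck : List Char → Nat → Bool
  | [], _ => false
  | c :: rest, i =>
    if c ≠ ' ' && decide (i < 2) then true
    else if c ≠ ' ' then false
    else pvCheck rest (i + 1)

def style_error_004 (line : String) : Bool :=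
  let pos := pvFcp line.toList 0 none false false
  if pos ≠ -1 then
    -- line = line[:pos]; line = line[::-1]  (PySem.List.slice?_none_none_neg_one: [::-1] is reverse, never none)
    let l1 := PySem.List.slice line.toList none (some pos)
    let l2 := (PySem.List.slice? l1 none none (-1)).getD []
    pvCheck l2 0
  else false

-- ===== PORT B =====
def pvBLoop : List Char → Option Char → Bool → Nat → Bool → Bool
  | [], _, _, _, _ => false
  | c :: rest, quote, skip, run, seen =>
    let run' := if c = ' ' then run + 1 else 0
    let seen' := if c = ' ' then seen else true
    if skip then pvBLoop rest quote false run' seen'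
    else if c = '\\' then pvBLoop rest quote true run' seen'
    else if quote = none && (c = '"' || c = '\'') then pvBLoop rest (some c) skip run' seen'
    else if quote = none && c = '#' then seen && decide (run < 2)
    else if quote.isSome && quote = some c then pvBLoop rest none skip run' seen'
    else pvBLoop rest quote skip run' seen'

def style_error_004_alt (line : String) : Bool :=
  pvBLoop line.toList none false 0 false

-- ===== PRECONDITION & SPEC =====
def Spec_style_error_004 (line : String) (out : Bool) : Prop := out = style_error_004_alt line
instance (line : String) (out : Bool) : Decidable (Spec_style_error_004 line out) := by unfold Spec_style_error_004; infer_instance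

-- ===== CLAIM (what is proved, stated in full; the proofs are below) =====
def Claim_equal_style_error_004 : Prop := ∀ (line : String), Dom_style_error_004 line → Spec_style_error_004 line (style_error_004 line)

-- ===== LEMMAS AND PROOFS =====

-- relative-index comment finder shared by both characterisations
def pvFcpRel : List Char → Option Char → Bool → Option Nat
  | [], _, _ => none
  | c :: rest, quote, skip =>
    if skip then (pvFcpRel rest quote false).map (· + 1)
    else if c = '\\' then (pvFcpRel rest quote true).map (· + 1)
    else if quote = none && (c = '"' || c = '\'') then (pvFcpRel rest (some c) skip).map (· + 1)
    else if quote = none && c = '#' then some 0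
    else if quote.isSome && quote = some c then (pvFcpRel rest none skip).map (· + 1)
    else (pvFcpRel rest quote skip).map (· + 1)

def pvTrail (p : List Char) (run : Nat) : Nat := p.foldl (fun r c => if c = ' ' then r + 1 else 0) run
def pvSeen (p : List Char) (seen : Bool) : Bool := p.foldl (fun s c => if c = ' ' then s else true) seen
def pvLead : List Char → Nat
  | [] => 0
  | c :: r => if c = ' ' then pvLead r + 1 else 0

theorem pvFcp_eq_rel (l : List Char) : ∀ (i : Int) (quote : Option Char) (skip : Bool),
    pvFcp l i quote quote.isSome skip =
      (match pvFcpRel l quote skip with | some j => i + (j : Int) | none => -1) := by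
  induction l with
  | nil => intro i quote skip; simp [pvFcp, pvFcpRel]
  | cons c rest ih =>
    intro i quote skip
    cases quote with
    | none =>
      simp only [pvFcp, pvFcpRel, Option.isSome_none, Bool.not_false, Bool.true_and]
      split_ifs with h1 h2 h3 h4 <;>
        simp_all [ih, Option.isSome] <;>
        (cases h : pvFcpRel rest _ _ <;> simp_all <;> ring)
    | some q =>
      simp only [pvFcp, pvFcpRel, Option.isSome_some, Bool.not_true, Bool.false_and]
      split_ifs with h1 h2 h3 <;>
        simp_all [ih, Option.isSome] <;>
        (cases h : pvFcpRel rest _ _ <;> simp_all <;> ring)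

theorem pvStep (c : Char) (rest : List Char) (o : Option Nat) (run : Nat) (seen : Bool) :
    (match o.map (· + 1) with
     | some j => pvSeen ((c :: rest).take j) seen && decide (pvTrail ((c :: rest).take j) run < 2)
     | none => false) =
    (match o with
     | some j => pvSeen (rest.take j) (if c = ' ' then seen else true) &&
                 decide (pvTrail (rest.take j) (if c = ' ' then run + 1 else 0) < 2)
     | none => false) := by
  cases o with
  | none => rfl
  | some j => by_cases hc : c = ' ' <;> simp [pvSeen, pvTrail, hc, List.take_succ_cons]

theorem pvBLoop_char (l : List Char) : ∀ (quote : Option Char) (skip : Bool) (run : Nat) (seen : Bool),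
    pvBLoop l quote skip run seen =
      (match pvFcpRel l quote skip with
       | some j => pvSeen (l.take j) seen && decide (pvTrail (l.take j) run < 2)
       | none => false) := by
  induction l with
  | nil => intro quote skip run seen; simp [pvBLoop, pvFcpRel]
  | cons c rest ih =>
    intro quote skip run seen
    simp only [pvBLoop, pvFcpRel]
    split_ifs with h1 h2 h3 h4 h5 <;>
      first
      | (rw [ih, pvStep]; clear ih; simp_all [pvSeen, pvTrail])
      | (simp [List.take, pvSeen, pvTrail])

theorem pvCheck_char (q : List Char) : ∀ i : Nat,
    pvCheck q i = ((q.any (fun c => c ≠ ' ')) && decide (pvLead q + i < 2)) := by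
  induction q with
  | nil => intro i; simp [pvCheck]
  | cons c rest ih =>
    intro i
    by_cases hc : c = ' '
    · simp [pvCheck, hc, ih, pvLead]
      have h2 : pvLead rest + (i + 1) = pvLead rest + 1 + i := by omega
      rw [h2]
    · simp [pvCheck, hc, pvLead]

theorem pvLead_append (q : List Char) (c : Char) :
    pvLead (q ++ [c]) =
      if q.any (fun c => c ≠ ' ') then pvLead q
      else q.length + (if c = ' ' then 1 else 0) := by
  induction q with
  | nil => simp [pvLead]
  | cons d q' ih =>
    by_cases hd : d = ' ' <;> simp [pvLead, hd, ih] <;> split_ifs <;> simp_all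

theorem pvSeen_eq (p : List Char) : ∀ seen, pvSeen p seen = (seen || p.any (fun c => c ≠ ' ')) := by
  induction p with
  | nil => intro seen; simp [pvSeen]
  | cons c p' ih =>
    intro seen
    have h1 : pvSeen (c :: p') seen = pvSeen p' (if c = ' ' then seen else true) := rfl
    rw [h1, ih]
    by_cases hc : c = ' ' <;> simp [hc]

theorem pvTrail_char (p : List Char) : ∀ run,
    pvTrail p run =
      if p.any (fun c => c ≠ ' ') then pvLead p.reverse else p.length + run := by
  induction p with
  | nil => intro run; simp [pvTrail]
  | cons c p' ih =>
    intro run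
    have h1 : pvTrail (c :: p') run = pvTrail p' (if c = ' ' then run + 1 else 0) := rfl
    have hany : p'.reverse.any (fun c => c ≠ ' ') = p'.any (fun c => c ≠ ' ') := by
      simp [List.any_reverse]
    rw [h1, ih, show (c :: p').reverse = p'.reverse ++ [c] by simp, pvLead_append, hany]
    by_cases hc : c = ' ' <;>
      cases h : p'.any (fun c => decide (c ≠ ' ')) <;>
      simp_all <;> split_ifs <;>
      simp_all <;> first
        | omega
        | (rename_i hex; obtain ⟨x, hx, hnx⟩ := hex; exact absurd (h x hx) hnx)

theorem pvCheck_reverse (p : List Char) :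
    pvCheck p.reverse 0 = (pvSeen p false && decide (pvTrail p 0 < 2)) := by
  rw [pvCheck_char, pvSeen_eq, pvTrail_char]
  have hany : p.reverse.any (fun c => c ≠ ' ') = p.any (fun c => c ≠ ' ') := by
    simp [List.any_reverse]
  rw [hany]
  cases h : p.any (fun c => c ≠ ' ') <;> simp_all

-- ===== VERDICT (by name: the statement is the Claim_ definition above) =====
theorem style_error_004_spec : Claim_equal_style_error_004 := by
  unfold Claim_equal_style_error_004
  intro line _
  unfold Spec_style_error_004 style_error_004 style_error_004_alt
  have hA := pvFcp_eq_rel line.toList 0 none false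
  simp only [Option.isSome_none] at hA
  rw [pvBLoop_char, hA]
  cases h : pvFcpRel line.toList none false with
  | none => simp
  | some j =>
    simp only
    have hne : (0 + (j : Int)) ≠ -1 := by omega
    rw [if_pos hne]
    have hslice : PySem.List.slice line.toList none (some (0 + (j : Int))) = line.toList.take j := by
      rw [show (0 + (j : Int)) = (j : Int) by omega, PySem.List.slice_to_natCast]
    rw [hslice, PySem.List.slice?_none_none_neg_one]
    simp only [Option.getD_some]
    exact pvCheck_reverse _
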